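-- pv_equiv track=rewrite | github.com/kashishrajbrl-bit/vityarthi-fundamental-in-AI-and-ML-project | doc_recommendation.py | bfs_find_doctor
-- ===== SOURCE A (Python) =====
-- from collections import deque
--
-- graph = {
--     "Home": ["Clinic_A", "Clinic_B"],
--     "Clinic_A": ["Hospital_X"],
--     "Clinic_B": ["Hospital_Y"],
--     "Hospital_X": [],
--     "Hospital_Y": []
-- }
--
-- doctors = {
--     "Clinic_A": "General Physician",
--     "Clinic_B": "ENT",
--     "Hospital_X": "Cardiologist",
--     "Hospital_Y": "Neurologist"
-- }
--
-- def bfs_find_doctor(start, required_specialist):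
--     visited = set()
--     queue = deque([(start, [start])])
--     while queue:
--         node, path = queue.popleft()
--         if node in doctors and doctors[node] == required_specialist:
--             return node, path
--         for neighbor in graph[node]:
--             if neighbor not in visited:
--                 visited.add(neighbor)
--                 queue.append((neighbor, path + [neighbor]))
--     return None, []
-- ===== SOURCE B (Python) =====
-- from collections import deque
--
-- graph = {
--     "Home": ["Clinic_A", "Clinic_B"],
--     "Clinic_A": ["Hospital_X"],
--     "Clinic_B": ["Hospital_Y"],
--     "Hospital_X": [],
--     "Hospital_Y": []
-- }
--
-- doctors = {
--     "Clinic_A": "General Physician",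
--     "Clinic_B": "ENT",
--     "Hospital_X": "Cardiologist",
--     "Hospital_Y": "Neurologist"
-- }
--
-- def bfs_find_doctor(start, required_specialist):
--     # BFS with a parent-pointer table: queue holds bare node ids, the path is
--     # reconstructed from `parent` only when a matching node is found.
--     visited = set()
--     parent = {}
--     queue = deque([start])
--     while queue:
--         node = queue.popleft()
--         if node in doctors and doctors[node] == required_specialist:
--             path = []
--             cur = node
--             while cur != start:
--                 path.append(cur)
--                 cur = parent[cur]
--             path.append(start)
--             path.reverse()
--             return node, path
--         for neighbor in graph[node]:
--             if neighbor not in visited: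
--                 visited.add(neighbor)
--                 parent[neighbor] = node
--                 queue.append(neighbor)
--     return None, []
-- ===== Notes on version B (the rewrite author's own statement) =====
-- stated objective: simpler
-- what changed: B runs BFS over bare node ids with a parent-pointer dict and reconstructs the path only once a matching node is found, instead of A's queue that carries a full copy of the path with every entry.
import Mathlib
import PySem

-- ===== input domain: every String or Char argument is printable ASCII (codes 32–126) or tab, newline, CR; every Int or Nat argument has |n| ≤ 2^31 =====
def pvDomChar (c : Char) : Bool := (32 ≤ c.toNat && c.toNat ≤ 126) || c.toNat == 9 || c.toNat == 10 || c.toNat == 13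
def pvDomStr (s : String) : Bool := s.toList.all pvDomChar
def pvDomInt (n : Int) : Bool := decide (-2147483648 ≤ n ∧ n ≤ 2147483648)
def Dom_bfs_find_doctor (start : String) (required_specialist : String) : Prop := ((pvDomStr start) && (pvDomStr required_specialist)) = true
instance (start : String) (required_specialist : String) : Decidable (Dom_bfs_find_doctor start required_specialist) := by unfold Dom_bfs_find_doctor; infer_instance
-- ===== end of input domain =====

-- B uses a parent-pointer table instead of carrying the whole path in the queue; objective: simpler queue state.
-- Equivalence is about the return value; neither function mutates its arguments.

-- ===== PORT A =====
def pvGraph : PySem.Dict String (List String) :=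
  PySem.Dict.ofList [("Home", ["Clinic_A", "Clinic_B"]), ("Clinic_A", ["Hospital_X"]),
                     ("Clinic_B", ["Hospital_Y"]), ("Hospital_X", []), ("Hospital_Y", [])]

def pvDoctors : PySem.Dict String String :=
  PySem.Dict.ofList [("Clinic_A", "General Physician"), ("Clinic_B", "ENT"),
                     ("Hospital_X", "Cardiologist"), ("Hospital_Y", "Neurologist")]

-- the while-loop of A; fuel only guards totality (5 nodes, each popped at most once)
def pvLoopA (req : String) : Nat → List (String × List String) → PySem.Set String → Option String × List String
  | 0, _, _ => (none, [])
  | _ + 1, [], _ => (none, [])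
  | fuel + 1, (node, path) :: rest, visited =>
    if pvDoctors.contains node && (pvDoctors.getD node "" == req) then
      (some node, path)
    else
      let qv := (pvGraph.getD node []).foldl
        (fun (qv : List (String × List String) × PySem.Set String) nb =>
          if nb ∈ qv.2 then qv else (qv.1 ++ [(nb, path ++ [nb])], PySem.Set.add qv.2 nb))
        (rest, visited)
      pvLoopA req fuel qv.1 qv.2

def bfs_find_doctor (start : String) (required_specialist : String) : Option String × List String :=
  pvLoopA required_specialist 12 [(start, [start])] PySem.Set.empty

-- ===== PORT B =====
-- inner while-loop of B: walk parent pointers from cur back towards start, appending nodes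
def pvWalkB (start : String) : Nat → PySem.Dict String String → String → List String → List String
  | 0, _, _, path => path
  | fuel + 1, parent, cur, path =>
    if cur ≠ start then pvWalkB start fuel parent (parent.getD cur "") (path ++ [cur])
    else path

-- outer while-loop of B: queue of bare node ids, visited set, parent dict
def pvLoopB (start req : String) : Nat → List String → PySem.Set String → PySem.Dict String String → Option String × List String
  | 0, _, _, _ => (none, [])
  | _ + 1, [], _, _ => (none, [])
  | fuel + 1, node :: rest, visited, parent =>
    if pvDoctors.contains node && (pvDoctors.getD node "" == req) then
      (some node, (pvWalkB start 12 parent node [] ++ [start]).reverse)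
    else
      let s := (pvGraph.getD node []).foldl
        (fun (s : List String × PySem.Set String × PySem.Dict String String) nb =>
          if nb ∈ s.2.1 then s else (s.1 ++ [nb], PySem.Set.add s.2.1 nb, s.2.2.insert nb node))
        (rest, visited, parent)
      pvLoopB start req fuel s.1 s.2.1 s.2.2

def bfs_find_doctor_alt (start : String) (required_specialist : String) : Option String × List String :=
  pvLoopB start required_specialist 12 [start] PySem.Set.empty PySem.Dict.empty

-- ===== PRECONDITION & SPEC =====
-- Pre_ excludes starts that are not keys of the fixed module-level graph: there both A and B
-- raise KeyError on graph[node], so no value is returned.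
def Pre_bfs_find_doctor (start : String) (required_specialist : String) : Prop :=
  start ∈ ["Home", "Clinic_A", "Clinic_B", "Hospital_X", "Hospital_Y"]
instance (start : String) (required_specialist : String) : Decidable (Pre_bfs_find_doctor start required_specialist) := by
  unfold Pre_bfs_find_doctor; infer_instance

def pvWitness_bfs_find_doctor : String × String := ("Home", "Cardiologist")

def Spec_bfs_find_doctor (start : String) (required_specialist : String) (out : Option String × List String) : Prop := out = bfs_find_doctor_alt start required_specialist
instance (start : String) (required_specialist : String) (out : Option String × List String) : Decidable (Spec_bfs_find_doctor start required_specialist out) := by unfold Spec_bfs_find_doctor; infer_instance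

-- ===== CLAIM (what is proved, stated in full; the proofs are below) =====
def Claim_equal_bfs_find_doctor : Prop := ∀ (start : String) (required_specialist : String), Dom_bfs_find_doctor start required_specialist → Pre_bfs_find_doctor start required_specialist → Spec_bfs_find_doctor start required_specialist (bfs_find_doctor start required_specialist)

-- ===== LEMMAS AND PROOFS =====

-- closed-form evaluations of the two fixed module-level dicts at each graph node
theorem pvDocHome : pvDoctors.contains "Home" = false := by decide
theorem pvDocA : pvDoctors.contains "Clinic_A" = true := by decide
theorem pvDocB : pvDoctors.contains "Clinic_B" = true := by decide
theorem pvDocX : pvDoctors.contains "Hospital_X" = true := by decide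
theorem pvDocY : pvDoctors.contains "Hospital_Y" = true := by decide
theorem pvDocAV : pvDoctors.getD "Clinic_A" "" = "General Physician" := by decide
theorem pvDocBV : pvDoctors.getD "Clinic_B" "" = "ENT" := by decide
theorem pvDocXV : pvDoctors.getD "Hospital_X" "" = "Cardiologist" := by decide
theorem pvDocYV : pvDoctors.getD "Hospital_Y" "" = "Neurologist" := by decide
theorem pvGHome : pvGraph.getD "Home" [] = ["Clinic_A", "Clinic_B"] := by decide
theorem pvGA : pvGraph.getD "Clinic_A" [] = ["Hospital_X"] := by decide
theorem pvGB : pvGraph.getD "Clinic_B" [] = ["Hospital_Y"] := by decide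
theorem pvGX : pvGraph.getD "Hospital_X" [] = [] := by decide
theorem pvGY : pvGraph.getD "Hospital_Y" [] = [] := by decide

-- ===== VERDICT (by name: the statement is the Claim_ definition above) =====
theorem bfs_find_doctor_spec : Claim_equal_bfs_find_doctor := by
  intro start req _ hpre
  unfold Spec_bfs_find_doctor
  unfold Pre_bfs_find_doctor at hpre
  simp only [List.mem_cons, List.not_mem_nil, or_false] at hpre
  by_cases h1 : req = "General Physician"
  · subst h1
    rcases hpre with h | h | h | h | h <;> subst h <;> decide
  by_cases h2 : req = "ENT"
  · subst h2
    rcases hpre with h | h | h | h | h <;> subst h <;> decide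
  by_cases h3 : req = "Cardiologist"
  · subst h3
    rcases hpre with h | h | h | h | h <;> subst h <;> decide
  by_cases h4 : req = "Neurologist"
  · subst h4
    rcases hpre with h | h | h | h | h <;> subst h <;> decide
  -- req matches no doctor: both searches exhaust the queue and return (none, [])
  rcases hpre with h | h | h | h | h <;> subst h <;>
    simp [bfs_find_doctor, bfs_find_doctor_alt, pvLoopA, pvLoopB, List.foldl,
          pvDocHome, pvDocA, pvDocB, pvDocX, pvDocY, pvDocAV, pvDocBV, pvDocXV, pvDocYV,
          pvGHome, pvGA, pvGB, pvGX, pvGY, PySem.Set.add, PySem.Set.empty, PySem.Dict.empty,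
          Ne.symm h1, Ne.symm h2, Ne.symm h3, Ne.symm h4]
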